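-- pv_equiv track=rewrite | github.com/JeffreyAsuncion/CodingProblems_Python | Lambda/fibonacciSimpleSum2.py | fibonacciSimpleSum2
-- ===== SOURCE A (Python) =====
-- def fibonacciSimpleSum2(n):
--     # initialize fib sequence
--     fib = [0, 1]
--
--     # set range so O(1)
--     # populate the fibonacciSequence
--     for i in range(2,700):
--         fib.append(fib[i-1] + fib[i-2])
--
--     for i in range(0, len(fib)):
--         # check condition
--         if n - fib[i] in fib:
--             return True
--
--     return False
-- ===== SOURCE B (Python) =====
-- def fibonacciSimpleSum2(n):
--     # same Fibonacci table as A
--     fib = [0, 1]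
--     for i in range(2, 700):
--         fib.append(fib[i - 1] + fib[i - 2])
--
--     # two-pointer scan over the sorted table instead of A's quadratic membership scan
--     lo, hi = 0, len(fib) - 1
--     while lo <= hi:
--         s = fib[lo] + fib[hi]
--         if s == n:
--             return True
--         if s < n:
--             lo += 1
--         else:
--             hi -= 1
--     return False
-- ===== Notes on version B (the rewrite author's own statement) =====
-- stated objective: faster
-- what changed: A's per-element linear membership scan over the precomputed Fibonacci table is replaced by a single two-pointer sweep (lo/hi, with lo <= hi so a value may pair with itself) over the same sorted table.
import Mathlib
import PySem

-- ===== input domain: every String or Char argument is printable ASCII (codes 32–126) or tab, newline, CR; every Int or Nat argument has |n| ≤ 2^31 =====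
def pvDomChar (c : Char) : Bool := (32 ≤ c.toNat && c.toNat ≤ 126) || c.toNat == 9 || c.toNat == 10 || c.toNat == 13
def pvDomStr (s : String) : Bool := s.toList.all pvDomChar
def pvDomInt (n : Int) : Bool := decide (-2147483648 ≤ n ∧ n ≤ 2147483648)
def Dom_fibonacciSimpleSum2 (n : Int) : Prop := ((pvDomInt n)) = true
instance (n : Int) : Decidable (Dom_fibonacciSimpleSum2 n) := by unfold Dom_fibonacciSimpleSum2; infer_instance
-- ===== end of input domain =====

-- B replaces A's per-element membership scan over the Fibonacci table with a single
-- two-pointer sweep over the same (sorted) table; the construction of the table is kept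
-- identical (shared helper pvBuildFib used verbatim by both ports).

-- ===== PORT A =====
-- the fib-table construction loop, identical code in A and in B
def pvBuildFib : List Int :=
  (PySem.List.pyRange 2 700 1).foldl
    (fun fib i => fib ++ [PySem.List.pyGetD fib (i - 1) 0 + PySem.List.pyGetD fib (i - 2) 0])
    [0, 1]

def fibonacciSimpleSum2 (n : Int) : Bool :=
  let fib := pvBuildFib
  (PySem.List.pyRange 0 fib.length 1).any
    (fun i => fib.contains (n - PySem.List.pyGetD fib i 0))

-- ===== PORT B =====
-- the while-loop of Source B: lo/hi two-pointer sweep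
def pvTwoPointer (fib : List Int) (n : Int) (lo hi : Int) : Bool :=
  if lo ≤ hi then
    let s := PySem.List.pyGetD fib lo 0 + PySem.List.pyGetD fib hi 0
    if s = n then true
    else if s < n then pvTwoPointer fib n (lo + 1) hi
    else pvTwoPointer fib n lo (hi - 1)
  else false
termination_by (hi + 1 - lo).toNat
decreasing_by all_goals omega

def fibonacciSimpleSum2_alt (n : Int) : Bool :=
  let fib := pvBuildFib
  pvTwoPointer fib n 0 (fib.length - 1)

-- ===== PRECONDITION & SPEC =====
def Spec_fibonacciSimpleSum2 (n : Int) (out : Bool) : Prop := out = fibonacciSimpleSum2_alt n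
instance (n : Int) (out : Bool) : Decidable (Spec_fibonacciSimpleSum2 n out) := by unfold Spec_fibonacciSimpleSum2; infer_instance

-- ===== CLAIM (what is proved, stated in full; the proofs are below) =====
def Claim_equal_fibonacciSimpleSum2 : Prop := ∀ (n : Int), Dom_fibonacciSimpleSum2 n → Spec_fibonacciSimpleSum2 n (fibonacciSimpleSum2 n)

-- ===== LEMMAS AND PROOFS =====

-- invariant of the fib table: at least 2 elements, nondecreasing, nonnegative
def FibInv (l : List Int) : Prop :=
  2 ≤ l.length ∧ List.IsChain (· ≤ ·) l ∧ ∀ x ∈ l, (0:Int) ≤ x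

theorem fibInv_step (l : List Int) (a : Int) (hlen : (l.length : Int) = a) (h : FibInv l) :
    FibInv (l ++ [PySem.List.pyGetD l (a - 1) 0 + PySem.List.pyGetD l (a - 2) 0]) := by
  obtain ⟨h2, hch, hnn⟩ := h
  have e1 : (a - 1).toNat = l.length - 1 := by omega
  have e2 : (a - 2).toNat = l.length - 2 := by omega
  have h1 : PySem.List.pyGetD l (a - 1) 0 = l[l.length - 1]'(by omega) := by
    rw [PySem.List.pyGetD_eq_getElem l 0 (by omega) (by omega)]
    simp only [e1]
  have h2' : PySem.List.pyGetD l (a - 2) 0 = l[l.length - 2]'(by omega) := by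
    rw [PySem.List.pyGetD_eq_getElem l 0 (by omega) (by omega)]
    simp only [e2]
  have hmem1 : l[l.length - 1]'(by omega) ∈ l := List.getElem_mem _
  have hmem2 : l[l.length - 2]'(by omega) ∈ l := List.getElem_mem _
  refine ⟨by simp; omega, ?_, ?_⟩
  · rw [List.isChain_append]
    refine ⟨hch, by simp, ?_⟩
    intro p hp q hq
    simp at hq
    subst hq
    rw [List.getLast?_eq_getElem?, List.getElem?_eq_getElem (by omega)] at hp
    simp at hp
    subst hp
    rw [h1, h2']
    have := hnn _ hmem2
    omega
  · intro x hx
    simp at hx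
    rcases hx with hx | hx
    · exact hnn x hx
    · rw [hx, h1, h2']
      have := hnn _ hmem1
      have := hnn _ hmem2
      omega

theorem fibInv_foldl_aux : ∀ (k : Nat) (b a : Int) (l : List Int), (b - a).toNat = k →
    (l.length : Int) = a → FibInv l →
    FibInv ((PySem.List.pyRange a b 1).foldl
      (fun fib i => fib ++ [PySem.List.pyGetD fib (i - 1) 0 + PySem.List.pyGetD fib (i - 2) 0]) l) := by
  intro k
  induction k with
  | zero =>
    intro b a l hk hlen hInv
    rw [PySem.List.pyRange_one_eq_nil (by omega)]
    exact hInv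
  | succ k ih =>
    intro b a l hk hlen hInv
    rw [PySem.List.pyRange_one_cons (by omega), List.foldl_cons]
    exact ih b (a + 1) _ (by omega) (by simp [hlen]) (fibInv_step l a hlen hInv)

theorem fib_mono (l : List Int) (hInv : FibInv l) (i j : Int)
    (h0 : 0 ≤ i) (hij : i ≤ j) (hj : j < (l.length : Int)) :
    PySem.List.pyGetD l i 0 ≤ PySem.List.pyGetD l j 0 := by
  obtain ⟨h2, hch, hnn⟩ := hInv
  have hpw : List.Pairwise (· ≤ ·) l := List.isChain_iff_pairwise.mp hch
  rw [PySem.List.pyGetD_eq_getElem l 0 (by omega) (by omega),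
      PySem.List.pyGetD_eq_getElem l 0 (by omega) (by omega)]
  rcases lt_or_eq_of_le (show i.toNat ≤ j.toNat by omega) with hlt | heq
  · exact (List.pairwise_iff_getElem.mp hpw) i.toNat j.toNat (by omega) (by omega) hlt
  · simp only [heq]
    exact le_refl _

theorem fibInv_build : FibInv pvBuildFib := by
  apply fibInv_foldl_aux 698 700 2 [0, 1] (by decide) (by decide)
  refine ⟨by norm_num, ?_, by norm_num⟩
  simp [List.isChain_cons]

-- two-pointer correctness on a table satisfying FibInv
theorem tp_iff (l : List Int) (hInv : FibInv l) (n : Int) :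
    ∀ (k : Nat) (lo hi : Int), (hi + 1 - lo).toNat = k → 0 ≤ lo → hi < (l.length : Int) →
    (pvTwoPointer l n lo hi = true ↔
      ∃ i j : Int, lo ≤ i ∧ i ≤ j ∧ j ≤ hi ∧
        PySem.List.pyGetD l i 0 + PySem.List.pyGetD l j 0 = n) := by
  intro k
  induction k with
  | zero =>
    intro lo hi hk h0 hhi
    rw [pvTwoPointer]
    rw [if_neg (by omega)]
    simp only [Bool.false_eq_true, false_iff]
    rintro ⟨i, j, hli, hij, hjh, -⟩
    omega
  | succ k ih =>
    intro lo hi hk h0 hhi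
    rw [pvTwoPointer]
    rw [if_pos (by omega : lo ≤ hi)]
    by_cases hs : PySem.List.pyGetD l lo 0 + PySem.List.pyGetD l hi 0 = n
    · rw [if_pos hs]
      simp only [true_iff]
      exact ⟨lo, hi, le_refl _, by omega, le_refl _, hs⟩
    · rw [if_neg hs]
      by_cases hlt : PySem.List.pyGetD l lo 0 + PySem.List.pyGetD l hi 0 < n
      · rw [if_pos hlt, ih (lo + 1) hi (by omega) (by omega) hhi]
        constructor
        · rintro ⟨i, j, hli, hij, hjh, hsum⟩
          exact ⟨i, j, by omega, hij, hjh, hsum⟩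
        · rintro ⟨i, j, hli, hij, hjh, hsum⟩
          refine ⟨i, j, ?_, hij, hjh, hsum⟩
          rcases eq_or_lt_of_le hli with heq | hlt'
          · exfalso
            have : PySem.List.pyGetD l j 0 ≤ PySem.List.pyGetD l hi 0 :=
              fib_mono l hInv j hi (by omega) hjh hhi
            rw [← heq] at hsum
            omega
          · omega
      · rw [if_neg hlt, ih lo (hi - 1) (by omega) h0 (by omega)]
        constructor
        · rintro ⟨i, j, hli, hij, hjh, hsum⟩
          exact ⟨i, j, hli, hij, by omega, hsum⟩
        · rintro ⟨i, j, hli, hij, hjh, hsum⟩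
          refine ⟨i, j, hli, hij, ?_, hsum⟩
          rcases eq_or_lt_of_le hjh with heq | hlt'
          · exfalso
            have : PySem.List.pyGetD l lo 0 ≤ PySem.List.pyGetD l i 0 :=
              fib_mono l hInv lo i h0 hli (by omega)
            rw [heq] at hsum
            omega
          · omega

-- A's index-scan-with-membership-test as a proposition
theorem any_iff (l : List Int) (n : Int) :
    ((PySem.List.pyRange 0 (l.length : Int) 1).any
      (fun i => l.contains (n - PySem.List.pyGetD l i 0)) = true) ↔
    ∃ x ∈ l, ∃ y ∈ l, x + y = n := by
  rw [List.any_eq_true]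
  constructor
  · rintro ⟨i, hi, hc⟩
    rw [PySem.List.mem_pyRange_one] at hi
    rw [List.contains_iff_mem] at hc
    refine ⟨PySem.List.pyGetD l i 0, ?_, n - PySem.List.pyGetD l i 0, hc, by ring⟩
    exact PySem.List.pyGetD_mem l 0 (by constructor <;> omega)
  · rintro ⟨x, hx, y, hy, hsum⟩
    obtain ⟨k, hk, hkx⟩ := List.mem_iff_getElem.mp hx
    refine ⟨(k : Int), ?_, ?_⟩
    · rw [PySem.List.mem_pyRange_one]
      omega
    · rw [List.contains_iff_mem]
      have hkv : PySem.List.pyGetD l (k : Int) 0 = x := by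
        rw [PySem.List.pyGetD_eq_getElem l 0 (by omega) (by omega)]
        simpa using hkx
      rw [hkv, show n - x = y by omega]
      exact hy

-- bridge: unordered membership pairs vs ordered index pairs
theorem pairs_iff (l : List Int) (n : Int) :
    ((∃ x ∈ l, ∃ y ∈ l, x + y = n) ↔
      ∃ i j : Int, 0 ≤ i ∧ i ≤ j ∧ j ≤ (l.length : Int) - 1 ∧
        PySem.List.pyGetD l i 0 + PySem.List.pyGetD l j 0 = n) := by
  constructor
  · rintro ⟨x, hx, y, hy, hsum⟩
    obtain ⟨kx, hkx, hkxe⟩ := List.mem_iff_getElem.mp hx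
    obtain ⟨ky, hky, hkye⟩ := List.mem_iff_getElem.mp hy
    have ex : PySem.List.pyGetD l (kx : Int) 0 = x := by
      rw [PySem.List.pyGetD_eq_getElem l 0 (by omega) (by omega)]; simpa using hkxe
    have ey : PySem.List.pyGetD l (ky : Int) 0 = y := by
      rw [PySem.List.pyGetD_eq_getElem l 0 (by omega) (by omega)]; simpa using hkye
    rcases le_total kx ky with hle | hle
    · exact ⟨(kx : Int), (ky : Int), by omega, by omega, by omega, by rw [ex, ey]; omega⟩
    · exact ⟨(ky : Int), (kx : Int), by omega, by omega, by omega, by rw [ex, ey]; omega⟩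
  · rintro ⟨i, j, h0, hij, hjl, hsum⟩
    refine ⟨PySem.List.pyGetD l i 0, ?_, PySem.List.pyGetD l j 0, ?_, hsum⟩
    · exact PySem.List.pyGetD_mem l 0 (by constructor <;> omega)
    · exact PySem.List.pyGetD_mem l 0 (by constructor <;> omega)

theorem a_iff (n : Int) :
    (fibonacciSimpleSum2 n = true ↔ ∃ x ∈ pvBuildFib, ∃ y ∈ pvBuildFib, x + y = n) :=
  any_iff pvBuildFib n

-- ===== VERDICT (by name: the statement is the Claim_ definition above) =====
theorem fibonacciSimpleSum2_spec : Claim_equal_fibonacciSimpleSum2 := by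
  intro n _
  unfold Spec_fibonacciSimpleSum2
  have hInv := fibInv_build
  have hb : fibonacciSimpleSum2_alt n = true ↔
      ∃ i j : Int, 0 ≤ i ∧ i ≤ j ∧ j ≤ (pvBuildFib.length : Int) - 1 ∧
        PySem.List.pyGetD pvBuildFib i 0 + PySem.List.pyGetD pvBuildFib j 0 = n := by
    show pvTwoPointer pvBuildFib n 0 ((pvBuildFib.length : Int) - 1) = true ↔ _
    exact tp_iff pvBuildFib hInv n _ 0 ((pvBuildFib.length : Int) - 1) rfl le_rfl
      (by have := hInv.1; omega)
  rw [Bool.eq_iff_iff, a_iff n, hb, pairs_iff]
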